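-- pv_equiv track=rewrite | github.com/IrinaRun/Repo-1 | Sesiune 5/Tema 5.py | dictionar_nr
-- ===== SOURCE A (Python) =====
-- def dictionar_nr(nr_aparitii):
--     cifra =len(nr_aparitii)
--     dictionar=dict()
--     k=0
--     for i in range(0,cifra):
--         aparitii =1
--         for j in range(0, cifra):
--             if (i != j) and (nr_aparitii[i] == nr_aparitii[j]):
--                 aparitii += 1
--         dictionar[k]=(nr_aparitii[i],aparitii)
--         k+=1
--     return dictionar
-- ===== SOURCE B (Python) =====
-- def dictionar_nr(nr_aparitii):
--     counts = {}
--     for v in nr_aparitii: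
--         counts[v] = counts.get(v, 0) + 1
--     return {i: (v, counts[v]) for i, v in enumerate(nr_aparitii)}
-- ===== Notes on version B (the rewrite author's own statement) =====
-- stated objective: faster
-- what changed: Replaces the quadratic nested scan (recounting the value at every index) with a single counting pass building a frequency dict, then one enumerate pass to emit (value, frequency) per index.
import Mathlib
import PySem

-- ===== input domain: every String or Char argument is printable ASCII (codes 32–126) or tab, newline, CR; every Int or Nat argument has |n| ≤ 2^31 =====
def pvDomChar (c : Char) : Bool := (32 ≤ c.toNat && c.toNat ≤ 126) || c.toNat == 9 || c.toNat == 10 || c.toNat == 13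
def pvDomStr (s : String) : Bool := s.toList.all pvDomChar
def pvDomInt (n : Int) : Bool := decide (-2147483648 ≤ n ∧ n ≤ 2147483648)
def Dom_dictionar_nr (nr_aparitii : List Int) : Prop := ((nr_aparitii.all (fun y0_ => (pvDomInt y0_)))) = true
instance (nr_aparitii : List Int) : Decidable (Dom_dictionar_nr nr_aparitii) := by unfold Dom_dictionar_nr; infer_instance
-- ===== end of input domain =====

-- B replaces A's quadratic nested recount with one counting pass plus one enumerate pass (objective: faster).

-- ===== PORT A =====
-- indices i, j always lie in range, so nr_aparitii[i] is ported as pyGetD (never hits the default)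
def dictionar_nr (nr_aparitii : List Int) : List (Int × Int × Int) :=
  let cifra : Int := PySem.List.len nr_aparitii
  let st := (PySem.List.pyRange 0 cifra).foldl
    (fun (st : PySem.Dict Int (Int × Int) × Int) i =>
      let aparitii : Int := (PySem.List.pyRange 0 cifra).foldl
        (fun ap j =>
          if i ≠ j ∧ PySem.List.pyGetD nr_aparitii i 0 = PySem.List.pyGetD nr_aparitii j 0
          then ap + 1 else ap) 1
      (st.1.insert st.2 (PySem.List.pyGetD nr_aparitii i 0, aparitii), st.2 + 1))
    (PySem.Dict.empty, 0)
  st.1.items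

-- ===== PORT B =====
-- counts[v] = counts.get(v, 0) + 1 is Dict.insert v (getD v 0 + 1); the final dict comprehension's
-- keys (the enumerate indices) are pairwise distinct, so its items are exactly this mapped list
def dictionar_nr_alt (nr_aparitii : List Int) : List (Int × Int × Int) :=
  let counts := nr_aparitii.foldl (fun d v => d.insert v (d.getD v 0 + 1)) PySem.Dict.empty
  (PySem.List.enumerate nr_aparitii).map (fun p => (p.1, p.2, counts.getD p.2 0))

-- ===== PRECONDITION & SPEC =====
def Spec_dictionar_nr (nr_aparitii : List Int) (out : List (Int × Int × Int)) : Prop := out = dictionar_nr_alt nr_aparitii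
instance (nr_aparitii : List Int) (out : List (Int × Int × Int)) : Decidable (Spec_dictionar_nr nr_aparitii out) := by unfold Spec_dictionar_nr; infer_instance

-- ===== CLAIM (what is proved, stated in full; the proofs are below) =====
def Claim_equal_dictionar_nr : Prop := ∀ (nr_aparitii : List Int), Dom_dictionar_nr nr_aparitii → Spec_dictionar_nr nr_aparitii (dictionar_nr nr_aparitii)

-- ===== LEMMAS AND PROOFS =====

-- A's inner loop over j computes the frequency of nr_aparitii[i] in the whole list:
-- the +1 start stands in for the skipped j = i position.
lemma inner_eq_count (xs : List Int) (i : Int) (h0 : 0 ≤ i) (h1 : i < PySem.List.len xs) :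
    (PySem.List.pyRange 0 (PySem.List.len xs)).foldl
      (fun ap j =>
        if i ≠ j ∧ PySem.List.pyGetD xs i 0 = PySem.List.pyGetD xs j 0
        then ap + 1 else ap) 1
    = (xs.count (PySem.List.pyGetD xs i 0) : Int) := by
  set v := PySem.List.pyGetD xs i 0 with hv
  set n := PySem.List.len xs with hn
  rw [PySem.List.foldl_ite_add_one (fun j => i ≠ j ∧ v = PySem.List.pyGetD xs j 0)]
  have hsplit : PySem.List.pyRange 0 n
      = PySem.List.pyRange 0 i ++ (i :: PySem.List.pyRange (i+1) n) := by
    rw [PySem.List.pyRange_one_append 0 i n h0 (le_of_lt h1), PySem.List.pyRange_one_cons h1]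
  have hq : xs.count v
      = List.countP (fun j => decide (v = PySem.List.pyGetD xs j 0)) (PySem.List.pyRange 0 n) := by
    conv_lhs => rw [← PySem.List.map_pyGetD_pyRange_zero xs 0]
    rw [List.count_eq_countP, List.countP_map, ← hn]
    refine List.countP_congr (fun j _ => ?_)
    constructor <;> intro h <;> simp_all [Function.comp]
  have hcongr1 : ∀ j ∈ PySem.List.pyRange 0 i,
      (decide (i ≠ j ∧ v = PySem.List.pyGetD xs j 0) = true
        ↔ decide (v = PySem.List.pyGetD xs j 0) = true) := by
    intro j hj
    have := PySem.List.mem_pyRange_one.mp hj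
    simp only [decide_eq_true_eq]
    exact ⟨fun h => h.2, fun h => ⟨by omega, h⟩⟩
  have hcongr2 : ∀ j ∈ PySem.List.pyRange (i+1) n,
      (decide (i ≠ j ∧ v = PySem.List.pyGetD xs j 0) = true
        ↔ decide (v = PySem.List.pyGetD xs j 0) = true) := by
    intro j hj
    have := PySem.List.mem_pyRange_one.mp hj
    simp only [decide_eq_true_eq]
    exact ⟨fun h => h.2, fun h => ⟨by omega, h⟩⟩
  rw [hq, hsplit]
  simp only [List.countP_append, List.countP_cons,
    List.countP_congr hcongr1, List.countP_congr hcongr2]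
  simp only [decide_eq_true_eq]
  have hpi : ¬ (i ≠ i ∧ v = PySem.List.pyGetD xs i 0) := by simp
  have hqi : (v = PySem.List.pyGetD xs i 0) := hv
  simp only [if_neg hpi, if_pos hqi]
  push_cast
  ring

-- the step function of A's outer loop, abbreviated for the invariant
def aStep (xs : List Int) (st : PySem.Dict Int (Int × Int) × Int) (i : Int) :
    PySem.Dict Int (Int × Int) × Int :=
  let aparitii : Int := (PySem.List.pyRange 0 (PySem.List.len xs)).foldl
    (fun ap j =>
      if i ≠ j ∧ PySem.List.pyGetD xs i 0 = PySem.List.pyGetD xs j 0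
      then ap + 1 else ap) 1
  (st.1.insert st.2 (PySem.List.pyGetD xs i 0, aparitii), st.2 + 1)

-- invariant of A's outer loop: after the first m indices, k = m and the dict's items
-- list the processed indices in order with their value and frequency
lemma outer_invariant (xs : List Int) (m : Nat) (hm : m ≤ xs.length) :
    ((PySem.List.pyRange 0 (m : Int)).foldl (aStep xs) (PySem.Dict.empty, 0)).2 = (m : Int)
    ∧ ((PySem.List.pyRange 0 (m : Int)).foldl (aStep xs) (PySem.Dict.empty, 0)).1.items
      = (PySem.List.pyRange 0 (m : Int)).map
          (fun i => (i, PySem.List.pyGetD xs i 0, (xs.count (PySem.List.pyGetD xs i 0) : Int))) := by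
  induction m with
  | zero => simp [PySem.List.pyRange_one_eq_nil, PySem.Dict.empty]
  | succ m ih =>
    obtain ⟨ihk, ihitems⟩ := ih (Nat.le_of_succ_le hm)
    have hmle : (0 : Int) ≤ (m : Int) := by positivity
    have hsucc : PySem.List.pyRange 0 ((m + 1 : Nat) : Int)
        = PySem.List.pyRange 0 (m : Int) ++ [(m : Int)] := by
      push_cast
      exact PySem.List.pyRange_one_succ_right hmle
    rw [hsucc, List.foldl_append, List.map_append]
    set d := ((PySem.List.pyRange 0 (m : Int)).foldl (aStep xs) (PySem.Dict.empty, 0)).1 with hd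
    have hnc : d.contains (m : Int) = false := by
      by_contra hc
      have hc' : d.contains (m : Int) = true := by
        cases h : d.contains (m : Int) with
        | false => exact absurd h hc
        | true => rfl
      have hmem := (PySem.Dict.contains_iff_mem_keys d (m : Int)).mp hc'
      unfold PySem.Dict.keys at hmem
      rw [ihitems, List.map_map] at hmem
      obtain ⟨i, hi, hie⟩ := List.mem_map.mp hmem
      have := PySem.List.mem_pyRange_one.mp hi
      simp only [Function.comp] at hie
      omega
    have hmlt : (m : Int) < PySem.List.len xs := by
      simp only [PySem.List.len_eq]; exact_mod_cast Nat.lt_of_lt_of_le (Nat.lt_succ_self m) hm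
    constructor
    · simp only [List.foldl_cons, List.foldl_nil, aStep, ihk]
      push_cast; ring
    · simp only [List.foldl_cons, List.foldl_nil, aStep]
      rw [ihk, PySem.Dict.items_insert_of_not_contains _ _ hnc, ihitems,
        inner_eq_count xs (m : Int) hmle hmlt]
      simp

-- B's mapped function equals A's per-index triple
lemma alt_eq_canonical (xs : List Int) :
    dictionar_nr_alt xs
    = (PySem.List.pyRange 0 (PySem.List.len xs)).map
        (fun i => (i, PySem.List.pyGetD xs i 0, (xs.count (PySem.List.pyGetD xs i 0) : Int))) := by
  unfold dictionar_nr_alt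
  rw [PySem.Dict.foldl_insert_getD_add_one_eq_counter,
    PySem.List.enumerate_eq_map_pyRange xs 0, List.map_map]
  refine List.map_congr_left (fun i _ => ?_)
  simp [Function.comp, PySem.Dict.getD_counter]

-- ===== VERDICT (by name: the statement is the Claim_ definition above) =====
theorem dictionar_nr_spec : Claim_equal_dictionar_nr := by
  intro xs _
  unfold Spec_dictionar_nr dictionar_nr
  have h := outer_invariant xs xs.length (le_refl _)
  rw [alt_eq_canonical]
  simp only [PySem.List.len_eq]
  exact h.2
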